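-- pv_equiv track=rewrite | github.com/jakebusse/Bingo | card.py | check_card
-- ===== SOURCE A (Python) =====
-- def check_card(card, pattern):
--     """
--     Takes card and list signifying a pattern of a valid BINGO. This function finds the indexes of daubed numbers on
--     the valid bingo and searches each 'winning' spot on the player card. If the player card matches the winning card,
--     True is returned. If the winning card does not match, False is returned.
--     :param card:
--     :param pattern:
--     :return:
--     """
--     pattern_indexes = [[], [], [], [], []]
--     pattern_count = 0
--     for letter in range(len(pattern)):
--         for pos in range(len(pattern[letter])):
--             if pattern[letter][pos] == -1:
--                 pattern_indexes[letter].append(pos)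
--                 pattern_count += 1
--     card_count = 0
--     for letter in range(len(pattern_indexes)):
--         for pos in range(len(pattern_indexes[letter])):
--             if card[letter][pattern_indexes[letter][pos]] == -1:
--                 card_count += 1
--     if pattern_count == card_count:
--         return True
--     else:
--         return False
-- ===== SOURCE B (Python) =====
-- def check_card(card, pattern):
--     return all(card[i][j] == -1
--                for i, row in enumerate(pattern)
--                for j, v in enumerate(row)
--                if v == -1)
-- ===== Notes on version B (the rewrite author's own statement) =====
-- stated objective: simpler
-- what changed: Replaces A's two-phase structure (build a 5-row table of matching pattern indexes plus a pattern counter, then re-traverse the table counting card matches and compare the two counters) by a single short-circuiting pass that checks every pattern -1 cell directly against the card.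
import Mathlib
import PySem

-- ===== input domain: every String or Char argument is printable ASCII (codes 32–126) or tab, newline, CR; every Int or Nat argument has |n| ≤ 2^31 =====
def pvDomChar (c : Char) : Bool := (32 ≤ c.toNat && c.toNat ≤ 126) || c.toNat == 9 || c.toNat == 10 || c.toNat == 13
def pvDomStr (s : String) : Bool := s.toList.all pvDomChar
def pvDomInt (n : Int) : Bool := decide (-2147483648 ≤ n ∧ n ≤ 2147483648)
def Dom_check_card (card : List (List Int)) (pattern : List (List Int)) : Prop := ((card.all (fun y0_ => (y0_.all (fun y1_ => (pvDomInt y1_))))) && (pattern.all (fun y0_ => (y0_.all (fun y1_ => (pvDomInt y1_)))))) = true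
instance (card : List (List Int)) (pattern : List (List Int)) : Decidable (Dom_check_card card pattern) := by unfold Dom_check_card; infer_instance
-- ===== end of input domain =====

-- B replaces A's two-phase structure (build a 5-row index table and a pattern counter, then
-- re-traverse the table counting card matches and compare counters) by one direct
-- short-circuiting pass over the pattern; equal wherever A returns (objective: simpler).

-- ===== PORT A =====
-- phase 1 of A: build pattern_indexes (a fixed table of 5 rows) and pattern_count.
-- Out-of-range accesses (IndexError in Python, excluded by Pre_) are rendered with
-- getD / no-op modify; inside Pre_ every access is in range.
def pattern_scan (pattern : List (List Int)) : List (List Nat) × Int :=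
  (List.range pattern.length).foldl
    (fun (st : List (List Nat) × Int) letter =>
      (List.range (pattern.getD letter []).length).foldl
        (fun st pos =>
          if (pattern.getD letter []).getD pos 0 == -1 then
            (st.1.modify letter (fun r => r ++ [pos]), st.2 + 1)
          else st)
        st)
    ([[], [], [], [], []], 0)

-- phase 2 of A: re-traverse pattern_indexes, counting daubed card cells
def card_scan (card : List (List Int)) (tbl : List (List Nat)) : Int :=
  (List.range tbl.length).foldl
    (fun (cc : Int) letter =>
      (List.range (tbl.getD letter []).length).foldl
        (fun cc pos =>
          if (card.getD letter []).getD ((tbl.getD letter []).getD pos 0) 0 == -1 then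
            cc + 1
          else cc)
        cc)
    0

def check_card (card : List (List Int)) (pattern : List (List Int)) : Bool :=
  let phase1 := pattern_scan pattern
  phase1.2 == card_scan card phase1.1

-- ===== PORT B =====
-- literal transliteration of Source B: all(card[i][j] == -1 for i,row in enumerate(pattern)
--                                      for j,v in enumerate(row) if v == -1)
def check_card_alt (card : List (List Int)) (pattern : List (List Int)) : Bool :=
  pattern.zipIdx.all fun ri =>
    ri.1.zipIdx.all fun vj =>
      !(vj.1 == -1) || ((card.getD ri.2 []).getD vj.2 0 == -1)

-- ===== PRECONDITION & SPEC =====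
-- Pre_ excludes exactly the inputs on which A raises IndexError: a -1 pattern cell in a row
-- beyond the fixed 5-row index table, or one whose position is missing from the card.
def Pre_check_card (card : List (List Int)) (pattern : List (List Int)) : Prop :=
  ∀ i < pattern.length, ∀ j < (pattern.getD i []).length,
    (pattern.getD i []).getD j 0 = -1 →
      i < 5 ∧ i < card.length ∧ j < (card.getD i []).length
instance (card : List (List Int)) (pattern : List (List Int)) : Decidable (Pre_check_card card pattern) := by unfold Pre_check_card; infer_instance
def pvWitness_check_card : List (List Int) × List (List Int) :=
  ([[-1, 2], [3, -1]], [[-1, 0], [0, -1]])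
def Spec_check_card (card : List (List Int)) (pattern : List (List Int)) (out : Bool) : Prop := out = check_card_alt card pattern
instance (card : List (List Int)) (pattern : List (List Int)) (out : Bool) : Decidable (Spec_check_card card pattern out) := by unfold Spec_check_card; infer_instance

-- ===== CLAIM (what is proved, stated in full; the proofs are below) =====
def Claim_equal_check_card : Prop := ∀ (card : List (List Int)) (pattern : List (List Int)), Dom_check_card card pattern → Pre_check_card card pattern → Spec_check_card card pattern (check_card card pattern)

-- ===== LEMMAS AND PROOFS =====

-- positions of the -1 cells of one pattern row (what A stores in pattern_indexes[letter])
def rowIdxs (row : List Int) : List Nat :=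
  (List.range row.length).filter (fun pos => row.getD pos 0 == -1)

-- "card[i][j] == -1" as a predicate on table positions
def gOK (card : List (List Int)) (i j : Nat) : Bool :=
  (card.getD i []).getD j 0 == -1

theorem mem_rowIdxs {row : List Int} {j : Nat} :
    j ∈ rowIdxs row ↔ j < row.length ∧ row.getD j 0 = -1 := by
  simp [rowIdxs, List.mem_filter, List.mem_range]

theorem modify_modify_same {α : Type} (l : List α) (i : Nat) (f g : α → α) :
    (l.modify i f).modify i g = l.modify i (fun x => g (f x)) := by
  apply List.ext_getElem?
  intro j
  by_cases h : i = j <;> simp [h, Option.map_map, Function.comp_def]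

theorem foldl_modify_append {α : Type} (xs : List α) (L : Nat) (acc : List (List α)) :
    xs.foldl (fun acc pos => acc.modify L (fun r => r ++ [pos])) acc
      = acc.modify L (fun r => r ++ xs) := by
  induction xs generalizing acc with
  | nil =>
    simp only [List.foldl_nil, List.append_nil]
    apply List.ext_getElem?
    intro j
    by_cases h : L = j <;> simp [h]
  | cons x t ih => simp [List.foldl_cons, ih, modify_modify_same, List.append_assoc]

theorem phase1_inner (row : List Int) (L : Nat) (st : List (List Nat) × Int) :
    (List.range row.length).foldl
        (fun st pos =>
          if row.getD pos 0 == -1 then (st.1.modify L (fun r => r ++ [pos]), st.2 + 1)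
          else st) st
      = (st.1.modify L (fun r => r ++ rowIdxs row), st.2 + (rowIdxs row).length) := by
  obtain ⟨a, c⟩ := st
  have h : (fun (st : List (List Nat) × Int) pos =>
        if row.getD pos 0 == -1 then (st.1.modify L (fun r => r ++ [pos]), st.2 + 1)
        else st)
      = fun st pos =>
        ((fun (acc : List (List Nat)) pos => if row.getD pos 0 == -1 then acc.modify L (fun r => r ++ [pos]) else acc) st.1 pos,
         (fun (acc : Int) pos => if row.getD pos 0 == -1 then acc + 1 else acc) st.2 pos) := by
    funext st pos; dsimp only; split <;> rfl
  have hp := PySem.List.foldl_prod_mk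
      (fun (acc : List (List Nat)) pos => if row.getD pos 0 == -1 then acc.modify L (fun r => r ++ [pos]) else acc)
      (fun (acc : Int) pos => if row.getD pos 0 == -1 then acc + 1 else acc)
      (List.range row.length) a c
  rw [h, hp,
      PySem.List.foldl_if_eq_foldl_filter, PySem.List.foldl_if_add_one, foldl_modify_append]
  simp [rowIdxs, List.countP_eq_length_filter]

-- the pattern_indexes table, as a fold of per-row appends
def buildTable (pattern : List (List Int)) (n : Nat) : List (List Nat) :=
  (List.range n).foldl
    (fun acc letter => acc.modify letter (fun r => r ++ rowIdxs (pattern.getD letter [])))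
    [[], [], [], [], []]

theorem buildTable_length (pattern : List (List Int)) (n : Nat) :
    (buildTable pattern n).length = 5 := by
  induction n with
  | zero => rfl
  | succ n ih =>
    unfold buildTable at *
    rw [List.range_succ, List.foldl_append, List.foldl_cons, List.foldl_nil,
        List.length_modify, ih]

-- what one row of the table ends up being
def tableRow (pattern : List (List Int)) (n i : Nat) : List Nat :=
  if i < n ∧ i < 5 then rowIdxs (pattern.getD i []) else []

theorem buildTable_getD (pattern : List (List Int)) (n : Nat) :
    ∀ i, (buildTable pattern n).getD i [] = tableRow pattern n i := by
  induction n with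
  | zero =>
    intro i
    have h0 : ¬ (i < 0 ∧ i < 5) := by omega
    rw [tableRow, if_neg h0]
    match i with
    | 0 | 1 | 2 | 3 | 4 => rfl
    | (k+5) => simp [buildTable, List.getD]
  | succ n ih =>
    intro i
    unfold buildTable at *
    rw [List.range_succ, List.foldl_append, List.foldl_cons, List.foldl_nil]
    have hlen : ((List.range n).foldl
        (fun acc letter => acc.modify letter (fun r => r ++ rowIdxs (pattern.getD letter [])))
        ([[], [], [], [], []] : List (List Nat))).length = 5 := buildTable_length pattern n
    rw [List.getD, List.getElem?_modify]
    by_cases h5 : i < 5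
    · have hi : i < ((List.range n).foldl
          (fun acc letter => acc.modify letter (fun r => r ++ rowIdxs (pattern.getD letter [])))
          ([[], [], [], [], []] : List (List Nat))).length := by omega
      rw [List.getElem?_eq_getElem hi]
      have hih := ih i
      rw [List.getD, List.getElem?_eq_getElem hi, Option.getD_some] at hih
      by_cases hni : n = i
      · subst hni
        have e1 : tableRow pattern n n = [] := by rw [tableRow, if_neg (by omega)]
        have e2 : tableRow pattern (n + 1) n = rowIdxs (pattern.getD n []) := by
          rw [tableRow, if_pos ⟨by omega, h5⟩]
        simp only [Option.map_eq_map, Option.map_some, Option.getD_some]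
        rw [if_pos trivial, hih, e1, e2, List.nil_append]
      · have e3 : tableRow pattern (n + 1) i = tableRow pattern n i := by
          unfold tableRow
          by_cases hn : i < n
          · rw [if_pos ⟨by omega, h5⟩, if_pos ⟨hn, h5⟩]
          · rw [if_neg (by omega), if_neg (by omega)]
        simp only [Option.map_eq_map, Option.map_some, Option.getD_some]
        rw [if_neg hni, hih, e3]
    · have hnone : ((List.range n).foldl
          (fun acc letter => acc.modify letter (fun r => r ++ rowIdxs (pattern.getD letter [])))
          ([[], [], [], [], []] : List (List Nat)))[i]? = none := by
        rw [List.getElem?_eq_none_iff]; omega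
      rw [hnone]
      rw [tableRow, if_neg (by omega)]
      rfl

theorem pattern_scan_eq (pattern : List (List Int)) :
    pattern_scan pattern
      = (buildTable pattern pattern.length,
         ((List.range pattern.length).map
            (fun i => (((rowIdxs (pattern.getD i [])).length : Nat) : Int))).sum) := by
  unfold pattern_scan buildTable
  have h : (fun (st : List (List Nat) × Int) letter =>
        (List.range (pattern.getD letter []).length).foldl
          (fun st pos =>
            if (pattern.getD letter []).getD pos 0 == -1 then
              (st.1.modify letter (fun r => r ++ [pos]), st.2 + 1)
            else st)
          st)
      = fun st letter =>
        ((fun (acc : List (List Nat)) letter =>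
            acc.modify letter (fun r => r ++ rowIdxs (pattern.getD letter []))) st.1 letter,
         (fun (acc : Int) letter =>
            acc + ((rowIdxs (pattern.getD letter [])).length : Int)) st.2 letter) := by
    funext st letter
    exact phase1_inner (pattern.getD letter []) letter st
  have hp := PySem.List.foldl_prod_mk
      (fun (acc : List (List Nat)) letter =>
        acc.modify letter (fun r => r ++ rowIdxs (pattern.getD letter [])))
      (fun (acc : Int) letter =>
        acc + ((rowIdxs (pattern.getD letter [])).length : Int))
      (List.range pattern.length) [[], [], [], [], []] 0
  rw [h, hp]
  have ha := PySem.List.foldl_add (List.range pattern.length)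
      (fun letter => ((rowIdxs (pattern.getD letter [])).length : Int)) 0
  rw [ha, zero_add]

theorem count_inner (g : Nat → Bool) (lst : List Nat) (cc : Int) :
    (List.range lst.length).foldl
        (fun cc pos => if g (lst.getD pos 0) then cc + 1 else cc) cc
      = cc + (lst.countP g : Int) := by
  have hmap : (List.range lst.length).map (fun pos => lst.getD pos 0) = lst := by
    induction lst with
    | nil => simp
    | cons a t ih =>
      rw [List.length_cons, List.range_succ_eq_map, List.map_cons, List.map_map]
      have hc : (List.range t.length).map ((fun pos => (a :: t).getD pos 0) ∘ (fun i => i + 1))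
          = (List.range t.length).map (fun pos => t.getD pos 0) :=
        List.map_congr_left (fun x _ => rfl)
      rw [hc, ih]
      rfl
  calc (List.range lst.length).foldl
        (fun cc pos => if g (lst.getD pos 0) then cc + 1 else cc) cc
      = ((List.range lst.length).map (fun pos => lst.getD pos 0)).foldl
          (fun cc x => if g x then cc + 1 else cc) cc := by rw [List.foldl_map]
    _ = lst.foldl (fun cc x => if g x then cc + 1 else cc) cc := by rw [hmap]
    _ = cc + (lst.countP g : Int) := PySem.List.foldl_if_add_one g lst cc

theorem card_scan_eq (card : List (List Int)) (tbl : List (List Nat)) :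
    card_scan card tbl
      = ((List.range tbl.length).map
           (fun i => (((tbl.getD i []).countP (gOK card i) : Nat) : Int))).sum := by
  unfold card_scan
  have h : (fun (cc : Int) letter =>
        (List.range (tbl.getD letter []).length).foldl
          (fun cc pos =>
            if (card.getD letter []).getD ((tbl.getD letter []).getD pos 0) 0 == -1 then
              cc + 1
            else cc)
          cc)
      = fun cc letter => cc + (((tbl.getD letter []).countP (gOK card letter) : Nat) : Int) := by
    funext cc letter
    exact count_inner (gOK card letter) (tbl.getD letter []) cc
  rw [h]
  have ha := PySem.List.foldl_add (List.range tbl.length)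
      (fun letter => (((tbl.getD letter []).countP (gOK card letter) : Nat) : Int)) 0
  rw [ha, zero_add]

theorem sum_map_natCast (l : List Nat) (f : Nat → Nat) :
    (l.map (fun i => ((f i : Nat) : Int))).sum = (((l.map f).sum : Nat) : Int) := by
  induction l with
  | nil => simp
  | cons x t ih => simp [ih]

theorem sum_eq_sum_iff_list (l : List Nat) (f g : Nat → Nat)
    (h : ∀ i ∈ l, g i ≤ f i) :
    (l.map f).sum = (l.map g).sum ↔ ∀ i ∈ l, f i = g i := by
  induction l with
  | nil => simp
  | cons x t ih =>
    simp only [List.map_cons, List.sum_cons, List.mem_cons] at *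
    have hx := h x (Or.inl rfl)
    have ht : ∀ i ∈ t, g i ≤ f i := fun i hi => h i (Or.inr hi)
    have hs : (t.map g).sum ≤ (t.map f).sum := List.sum_le_sum ht
    constructor
    · intro he
      have hfx : f x = g x ∧ (t.map f).sum = (t.map g).sum := by omega
      have := (ih ht).mp hfx.2
      intro i hi
      rcases hi with rfl | hi
      · exact hfx.1
      · exact this i hi
    · intro hall
      have h1 : f x = g x := hall x (Or.inl rfl)
      have h2 : (t.map f).sum = (t.map g).sum := (ih ht).mpr fun i hi => hall i (Or.inr hi)
      omega

-- B = true iff every -1 cell of the pattern is matched on the card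
theorem checkB_iff (card pattern : List (List Int)) :
    check_card_alt card pattern = true
      ↔ ∀ i < pattern.length, ∀ j < (pattern.getD i []).length,
          (pattern.getD i []).getD j 0 = -1 → gOK card i j = true := by
  unfold check_card_alt
  simp only [List.all_eq_true]
  constructor
  · intro h i hi j hj hneg
    have hrow : pattern.getD i [] = pattern[i] := List.getD_eq_getElem pattern [] hi
    rw [hrow] at hj hneg
    have hri : (pattern[i], i) ∈ pattern.zipIdx := by
      rw [List.mem_zipIdx_iff_getElem?]
      exact List.getElem?_eq_getElem hi
    have hvj : (pattern[i][j], j) ∈ pattern[i].zipIdx := by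
      rw [List.mem_zipIdx_iff_getElem?]
      exact List.getElem?_eq_getElem hj
    have h2 := h _ hri _ hvj
    have hcell : pattern[i][j] = -1 := by
      rw [← List.getD_eq_getElem pattern[i] 0 hj]
      exact hneg
    rw [hcell] at h2
    simpa [gOK] using h2
  · intro h ri hri vj hvj
    rw [List.mem_zipIdx_iff_getElem?] at hri hvj
    have hi : ri.2 < pattern.length := by
      by_contra hc
      rw [List.getElem?_eq_none_iff.mpr (by omega)] at hri
      simp at hri
    have hj : vj.2 < ri.1.length := by
      by_contra hc
      rw [List.getElem?_eq_none_iff.mpr (by omega)] at hvj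
      simp at hvj
    rw [List.getElem?_eq_getElem hi] at hri
    rw [List.getElem?_eq_getElem hj] at hvj
    have hrow : pattern.getD ri.2 [] = ri.1 := by
      rw [List.getD_eq_getElem pattern [] hi, Option.some_inj.mp hri]
    by_cases hneg : vj.1 = -1
    · have hj2 : vj.2 < (pattern.getD ri.2 []).length := by rw [hrow]; exact hj
      have hcell : (pattern.getD ri.2 []).getD vj.2 0 = -1 := by
        rw [hrow, List.getD_eq_getElem ri.1 0 hj, Option.some_inj.mp hvj, hneg]
      have := h ri.2 hi vj.2 hj2 hcell
      simp [hneg, gOK] at this ⊢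
      exact this
    · simp [hneg]

-- ===== VERDICT (by name: the statement is the Claim_ definition above) =====
theorem check_card_spec : Claim_equal_check_card := by
  intro card pattern _hdom hpre
  unfold Spec_check_card
  -- abbreviations
  set L := pattern.length with hL
  have hzero : ∀ i, 5 ≤ i → rowIdxs (pattern.getD i []) = [] := by
    intro i h5
    by_cases hiL : i < L
    · by_contra hne
      obtain ⟨j, hj⟩ := List.exists_mem_of_ne_nil _ hne
      obtain ⟨hjlen, hjneg⟩ := mem_rowIdxs.mp hj
      have := (hpre i hiL j hjlen hjneg).1
      omega
    · have : pattern.getD i [] = [] := by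
        rw [List.getD]
        rw [List.getElem?_eq_none_iff.mpr (by omega)]
        rfl
      rw [this]; rfl
  -- the two counters as Nat sums
  have hA : check_card card pattern
      = ((((List.range L).map (fun i => (rowIdxs (pattern.getD i [])).length)).sum : Nat) ==
         (((List.range 5).map (fun i => (tableRow pattern L i).countP (gOK card i))).sum : Nat)) := by
    have hA1 : check_card card pattern
        = ((pattern_scan pattern).2 == card_scan card (pattern_scan pattern).1) := rfl
    rw [hA1, pattern_scan_eq, card_scan_eq, buildTable_length]
    have hm : (List.range 5).map
          (fun i => ((((buildTable pattern L).getD i []).countP (gOK card i) : Nat) : Int))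
        = (List.range 5).map
          (fun i => (((tableRow pattern L i).countP (gOK card i) : Nat) : Int)) := by
      apply List.map_congr_left
      intro i _
      rw [buildTable_getD]
    rw [hm, sum_map_natCast, sum_map_natCast]
    rw [Bool.eq_iff_iff]
    simp only [beq_iff_eq, Nat.cast_inj]
    exact Iff.rfl
  -- both sums trimmed to K = min L 5
  set K := min L 5 with hK
  have hP : ((List.range L).map (fun i => (rowIdxs (pattern.getD i [])).length)).sum
      = ((List.range K).map (fun i => (rowIdxs (pattern.getD i [])).length)).sum := by
    by_cases h5 : L ≤ 5
    · rw [hK, Nat.min_eq_left h5]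
    · have : L = 5 + (L - 5) := by omega
      rw [hK, Nat.min_eq_right (by omega), this, List.range_add, List.map_append,
          List.sum_append, List.map_map]
      have : ((List.range (L - 5)).map
          ((fun i => (rowIdxs (pattern.getD i [])).length) ∘ (fun x => 5 + x))).sum = 0 := by
        apply List.sum_eq_zero
        intro x hx
        simp only [List.mem_map] at hx
        obtain ⟨y, _, rfl⟩ := hx
        show (rowIdxs (pattern.getD (5 + y) [])).length = 0
        rw [hzero (5 + y) (by omega)]
        rfl
      rw [this, Nat.add_zero]
  have hC : ((List.range 5).map (fun i => (tableRow pattern L i).countP (gOK card i))).sum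
      = ((List.range K).map (fun i => (rowIdxs (pattern.getD i [])).countP (gOK card i))).sum := by
    by_cases h5 : 5 ≤ L
    · rw [hK, Nat.min_eq_right h5]
      apply congrArg
      apply List.map_congr_left
      intro i hi
      rw [List.mem_range] at hi
      rw [tableRow, if_pos ⟨by omega, hi⟩]
    · have h55 : (5 : Nat) = L + (5 - L) := by omega
      rw [hK, Nat.min_eq_left (by omega), h55, List.range_add, List.map_append,
          List.sum_append, List.map_map]
      have htail : ((List.range (5 - L)).map
          ((fun i => (tableRow pattern L i).countP (gOK card i)) ∘ (fun x => L + x))).sum = 0 := by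
        apply List.sum_eq_zero
        intro x hx
        simp only [List.mem_map] at hx
        obtain ⟨y, _, rfl⟩ := hx
        show (tableRow pattern L (L + y)).countP (gOK card (L + y)) = 0
        rw [tableRow, if_neg (by omega)]
        rfl
      rw [htail, Nat.add_zero]
      apply congrArg
      apply List.map_congr_left
      intro i hi
      rw [List.mem_range] at hi
      rw [tableRow, if_pos ⟨hi, by omega⟩]
  -- the counter comparison says: every table entry is daubed on the card
  have hiff : (((List.range L).map (fun i => (rowIdxs (pattern.getD i [])).length)).sum
        = ((List.range 5).map (fun i => (tableRow pattern L i).countP (gOK card i))).sum)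
      ↔ check_card_alt card pattern = true := by
    rw [hP, hC]
    rw [sum_eq_sum_iff_list _ _ _ (fun i _ => List.countP_le_length)]
    rw [checkB_iff]
    constructor
    · intro h i hi j hj hneg
      have h5 : i < 5 := (hpre i hi j hj hneg).1
      have hiK : i ∈ List.range K := List.mem_range.mpr (by omega)
      have := h i hiK
      rw [eq_comm, List.countP_eq_length] at this
      exact this j (mem_rowIdxs.mpr ⟨hj, hneg⟩)
    · intro h i hiK
      rw [List.mem_range] at hiK
      rw [eq_comm, List.countP_eq_length]
      intro j hj
      obtain ⟨hjlen, hjneg⟩ := mem_rowIdxs.mp hj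
      exact h i (by omega) j hjlen hjneg
  rw [hA]
  by_cases hB : check_card_alt card pattern = true
  · rw [hB, beq_iff_eq]
    exact hiff.mpr hB
  · have hB' : check_card_alt card pattern = false := Bool.eq_false_iff.mpr hB
    rw [hB']
    rw [Bool.eq_false_iff]
    intro hc
    exact hB (hiff.mp (beq_iff_eq.mp hc))
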